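-- pv_equiv track=rewrite | github.com/jonathankao97/2048-expecti_max | 2048_backend.py | shift_up_down
-- ===== SOURCE A (Python) =====
-- def matrix_direction_indices(direction):
--     if direction == 1:
--         left = 3
--         right = -1
--     else:
--         left = 0
--         right = 4
--     return left, right
--
-- def shift_up_down(board, direction):
--     left, right = matrix_direction_indices(-1*direction)
--     for col in range(0,4):
--         pointer = -1
--         for row in range(left, right, direction):
--             if board[row][col] == 0 and pointer == -1:
--                 pointer = row
--             elif board[row][col] != 0 and pointer != -1:
--                 board[pointer][col] = board[row][col]
--                 board[row][col] = 0
--                 pointer += direction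
--     return board
-- ===== SOURCE B (Python) =====
-- def shift_up_down(board, direction):
--     # gather-then-scatter per column: collect nonzero cells in visit order,
--     # write them back positionally, zero-fill the rest (mutates board in place)
--     if -1 * direction == 1:
--         rows = list(range(3, -1, -1))
--     else:
--         rows = list(range(0, 4, direction))
--     for col in range(0, 4):
--         vals = [board[r][col] for r in rows if board[r][col] != 0]
--         for i, r in enumerate(rows):
--             board[r][col] = vals[i] if i < len(vals) else 0
--     return board
-- ===== Notes on version B (the rewrite author's own statement) =====
-- stated objective: alternative
-- what changed: Replaces A's in-place single-pass gap-pointer swap per column with a two-pass gather-then-scatter: collect the column's nonzero values in visit order, then rewrite every visited cell positionally with those values padded by zeros.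
import Mathlib
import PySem

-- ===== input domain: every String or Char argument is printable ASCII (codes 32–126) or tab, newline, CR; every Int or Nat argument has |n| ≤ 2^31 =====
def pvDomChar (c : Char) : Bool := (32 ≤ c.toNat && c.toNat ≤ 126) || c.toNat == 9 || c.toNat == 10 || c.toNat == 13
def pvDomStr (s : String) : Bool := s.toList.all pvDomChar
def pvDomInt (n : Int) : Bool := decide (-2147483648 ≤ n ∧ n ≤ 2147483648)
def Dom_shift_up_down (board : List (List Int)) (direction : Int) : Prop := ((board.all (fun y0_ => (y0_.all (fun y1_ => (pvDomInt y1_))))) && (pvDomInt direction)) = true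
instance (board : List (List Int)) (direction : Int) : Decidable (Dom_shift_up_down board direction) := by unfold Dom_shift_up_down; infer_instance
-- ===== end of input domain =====

-- B replaces A's in-place gap-pointer compaction per column with a gather-then-scatter two-pass
-- (collect nonzeros in visit order, rewrite the column positionally, zero-fill); equal cost,
-- alternative decomposition.  Both Pythons mutate `board` in place and return it; the mutated
-- object equals the return value, so the return-value equivalence proved here covers the side
-- effect as well.

-- ===== PORT A =====
-- board[r][c] read / write with Python's indexing semantics (shared cell primitives)
def gcell (b : List (List Int)) (r c : Int) : Int :=
  PySem.List.pyGetD (PySem.List.pyGetD b r []) c 0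
def scell (b : List (List Int)) (r c : Int) (v : Int) : List (List Int) :=
  PySem.List.pySetD b r (PySem.List.pySetD (PySem.List.pyGetD b r []) c v)

def matrix_direction_indices (direction : Int) : Int × Int :=
  if direction = 1 then (3, -1) else (0, 4)

-- the body of A's inner `for row in range(left, right, direction)` loop; state = (board, pointer)
def stepA (direction col : Int) (st : List (List Int) × Int) (row : Int) : List (List Int) × Int :=
  if gcell st.1 row col = 0 ∧ st.2 = -1 then (st.1, row)
  else if gcell st.1 row col ≠ 0 ∧ st.2 ≠ -1 then
    (scell (scell st.1 st.2 col (gcell st.1 row col)) row col 0, st.2 + direction)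
  else st

def shift_up_down (board : List (List Int)) (direction : Int) : List (List Int) :=
  let lr := matrix_direction_indices (-1 * direction)
  (PySem.List.pyRange 0 4 1).foldl
    (fun b col => ((PySem.List.pyRange lr.1 lr.2 direction).foldl (stepA direction col) (b, -1)).1)
    board

-- ===== PORT B =====
-- vals = [board[r][col] for r in rows if board[r][col] != 0]
def gatherB (b : List (List Int)) (rows : List Int) (col : Int) : List Int :=
  rows.filterMap (fun r => if gcell b r col ≠ 0 then some (gcell b r col) else none)

-- body of `for i, r in enumerate(rows): board[r][col] = vals[i] if i < len(vals) else 0`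
def scatterB (col : Int) (vals : List Int) (b : List (List Int)) (ir : Int × Int) : List (List Int) :=
  scell b ir.2 col (if ir.1 < (vals.length : Int) then PySem.List.pyGetD vals ir.1 0 else 0)

def colB (b : List (List Int)) (rows : List Int) (col : Int) : List (List Int) :=
  (PySem.List.enumerate rows 0).foldl (scatterB col (gatherB b rows col)) b

def shift_up_down_alt (board : List (List Int)) (direction : Int) : List (List Int) :=
  let rows := if -1 * direction = 1 then PySem.List.pyRange 3 (-1) (-1)
              else PySem.List.pyRange 0 4 direction
  (PySem.List.pyRange 0 4 1).foldl (fun b col => colB b rows col) board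

-- ===== PRECONDITION & SPEC =====
-- Pre_ = exactly the inputs where Python A returns: direction ≠ 0 (range(0,4,0) is a ValueError)
-- and every visited row index (the list below) addresses an existing row of length ≥ 4
-- (cols 0..3 are read on every visited row; otherwise IndexError).
def Pre_shift_up_down (board : List (List Int)) (direction : Int) : Prop :=
  direction ≠ 0 ∧
  ∀ r ∈ (if -1 * direction = 1 then PySem.List.pyRange 3 (-1) (-1)
         else PySem.List.pyRange 0 4 direction),
    0 ≤ r ∧ r.toNat < board.length ∧ 4 ≤ (board.getD r.toNat []).length
instance (board : List (List Int)) (direction : Int) : Decidable (Pre_shift_up_down board direction) := by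
  unfold Pre_shift_up_down; infer_instance

def pvWitness_shift_up_down : List (List Int) × Int :=
  ([[0, 2, 0, 4], [2, 0, 0, 0], [0, 0, 0, 0], [2, 2, 2, 2]], 1)

def Spec_shift_up_down (board : List (List Int)) (direction : Int) (out : List (List Int)) : Prop := out = shift_up_down_alt board direction
instance (board : List (List Int)) (direction : Int) (out : List (List Int)) : Decidable (Spec_shift_up_down board direction out) := by unfold Spec_shift_up_down; infer_instance

-- ===== CLAIM (what is proved, stated in full; the proofs are below) =====
def Claim_equal_shift_up_down : Prop := ∀ (board : List (List Int)) (direction : Int), Dom_shift_up_down board direction → Pre_shift_up_down board direction → Spec_shift_up_down board direction (shift_up_down board direction)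

-- ===== LEMMAS AND PROOFS =====

lemma getD_set_ne {α : Type} (l : List α) (i j : Nat) (a d : α) (h : i ≠ j) :
    (l.set i a).getD j d = l.getD j d := by
  simp [List.getD, h]

lemma getD_set_self {α : Type} (l : List α) (i : Nat) (a d : α) (h : i < l.length) :
    (l.set i a).getD i d = a := by
  simp [List.getD, h]

lemma length_scell (b : List (List Int)) (r c v : Int) :
    (scell b r c v).length = b.length := by
  simp [scell, PySem.List.length_pySetD]

lemma rowlen_scell (b : List (List Int)) (r c v : Int) (hr : 0 ≤ r) (i : Nat) :
    ((scell b r c v).getD i []).length = (b.getD i []).length := by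
  simp only [scell, PySem.List.pySetD_of_nonneg _ _ hr, PySem.List.pyGetD_of_nonneg _ _ hr]
  by_cases h : r.toNat = i
  · subst h
    by_cases hlt : r.toNat < b.length
    · rw [getD_set_self _ _ _ _ hlt, PySem.List.length_pySetD]
    · rw [List.set_eq_of_length_le (by omega)]
  · rw [getD_set_ne _ _ _ _ _ h]

lemma gcell_scell_ne (b : List (List Int)) (r c r' c' v : Int)
    (hr : 0 ≤ r) (hr' : 0 ≤ r') (hc : 0 ≤ c) (hc' : 0 ≤ c')
    (h : r ≠ r' ∨ c ≠ c') :
    gcell (scell b r c v) r' c' = gcell b r' c' := by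
  simp only [gcell, scell, PySem.List.pySetD_of_nonneg _ _ hr,
    PySem.List.pyGetD_of_nonneg _ _ hr, PySem.List.pyGetD_of_nonneg _ _ hr',
    PySem.List.pyGetD_of_nonneg _ _ hc']
  by_cases hrr : r.toNat = r'.toNat
  · have hcc : c ≠ c' := by
      rcases h with h | h
      · exact absurd (by omega : r = r') h
      · exact h
    by_cases hlt : r.toNat < b.length
    · rw [← hrr, getD_set_self _ _ _ _ hlt, PySem.List.pySetD_of_nonneg _ _ hc,
        getD_set_ne _ _ _ _ _ (by omega)]
    · rw [List.set_eq_of_length_le (by omega)]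
  · rw [getD_set_ne _ _ _ _ _ hrr]

-- opaque side conditions (kept un-normalized so that simp's discharger matches them)
def idxOK (r : Int) (b : List (List Int)) : Prop := r.toNat < b.length
def cellOK (c r : Int) (b : List (List Int)) : Prop := c.toNat < (b.getD r.toNat []).length

lemma idxOK_scell (r r' c' v : Int) (b : List (List Int)) :
    idxOK r (scell b r' c' v) ↔ idxOK r b := by
  unfold idxOK; rw [length_scell]

lemma cellOK_scell (c r r' c' v : Int) (b : List (List Int)) (h : 0 ≤ r') :
    cellOK c r (scell b r' c' v) ↔ cellOK c r b := by
  unfold cellOK; rw [rowlen_scell _ _ _ _ h]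

lemma gcell_scell_same (b : List (List Int)) (r c v : Int)
    (hr : 0 ≤ r) (hc : 0 ≤ c) (hrb : idxOK r b) (hcb : cellOK c r b) :
    gcell (scell b r c v) r c = v := by
  unfold idxOK at hrb; unfold cellOK at hcb
  simp only [gcell, scell, PySem.List.pySetD_of_nonneg _ _ hr,
    PySem.List.pyGetD_of_nonneg _ _ hr, PySem.List.pyGetD_of_nonneg _ _ hc,
    PySem.List.pySetD_of_nonneg _ _ hc]
  rw [getD_set_self _ _ _ _ hrb, getD_set_self _ _ _ _ hcb]

lemma scell_noop (b : List (List Int)) (r c v : Int)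
    (hr : 0 ≤ r) (hc : 0 ≤ c) (hrb : idxOK r b) (hcb : cellOK c r b)
    (h : gcell b r c = v) :
    scell b r c v = b := by
  subst h
  unfold idxOK at hrb; unfold cellOK at hcb
  simp only [gcell, scell, PySem.List.pySetD_of_nonneg _ _ hr,
    PySem.List.pyGetD_of_nonneg _ _ hr, PySem.List.pyGetD_of_nonneg _ _ hc,
    PySem.List.pySetD_of_nonneg _ _ hc]
  rw [List.getD_eq_getElem _ _ hcb, List.set_getElem_self,
    List.getD_eq_getElem _ _ hrb, List.set_getElem_self]

lemma scell_scell_same (b : List (List Int)) (r c v w : Int) (hr : 0 ≤ r) (hc : 0 ≤ c) :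
    scell (scell b r c v) r c w = scell b r c w := by
  simp only [scell, PySem.List.pySetD_of_nonneg _ _ hr, PySem.List.pyGetD_of_nonneg _ _ hr,
    PySem.List.pySetD_of_nonneg _ _ hc]
  by_cases hlt : r.toNat < b.length
  · rw [getD_set_self _ _ _ _ hlt, List.set_set, List.set_set]
  · have hbl : b.length ≤ r.toNat := by omega
    rw [List.set_eq_of_length_le hbl, List.set_eq_of_length_le hbl]

lemma scell_comm (b : List (List Int)) (r c v r' c' w : Int)
    (hr : 0 ≤ r) (hr' : 0 ≤ r') (h : r ≠ r') :
    scell (scell b r c v) r' c' w = scell (scell b r' c' w) r c v := by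
  have hne : r.toNat ≠ r'.toNat := by omega
  simp only [scell, PySem.List.pySetD_of_nonneg _ _ hr, PySem.List.pySetD_of_nonneg _ _ hr',
    PySem.List.pyGetD_of_nonneg _ _ hr, PySem.List.pyGetD_of_nonneg _ _ hr']
  rw [getD_set_ne _ _ _ _ _ hne, getD_set_ne _ _ _ _ _ (Ne.symm hne), List.set_comm _ _ hne]

-- concrete visited-row lists
lemma pyRange_cols : PySem.List.pyRange 0 4 1 = [0, 1, 2, 3] := by decide
lemma pyRange_down : PySem.List.pyRange 3 (-1) (-1) = [3, 2, 1, 0] := by decide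
lemma pyRange_two : PySem.List.pyRange 0 4 2 = [0, 2] := by decide
lemma pyRange_three : PySem.List.pyRange 0 4 3 = [0, 3] := by decide

lemma pyRange_big (d : Int) (hd : 4 ≤ d) : PySem.List.pyRange 0 4 d = [0] := by
  rw [PySem.List.pyRange_of_pos _ _ (by omega)]
  have h4 : ((4 : Int) - 0 + d - 1) / d = 1 := by
    rw [show (4 : Int) - 0 + d - 1 = 3 + 1 * d by ring,
      Int.add_mul_ediv_right _ _ (by omega : d ≠ 0),
      Int.ediv_eq_zero_of_lt (by omega) (by omega)]
    omega
  rw [if_pos (by omega), h4]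
  simp

lemma pyRange_negstep (d : Int) (hd : d < 0) : PySem.List.pyRange 0 4 d = [] := by
  simp [PySem.List.pyRange, show d ≠ 0 by omega, show ¬ (0 : Int) < d by omega,
    show ¬ (4 : Int) < 0 by decide]

lemma enum4 : PySem.List.enumerate ([0, 1, 2, 3] : List Int) 0 = [(0, 0), (1, 1), (2, 2), (3, 3)] := by decide
lemma enum_down : PySem.List.enumerate ([3, 2, 1, 0] : List Int) 0 = [(0, 3), (1, 2), (2, 1), (3, 0)] := by decide
lemma enum02 : PySem.List.enumerate ([0, 2] : List Int) 0 = [(0, 0), (1, 2)] := by decide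
lemma enum03 : PySem.List.enumerate ([0, 3] : List Int) 0 = [(0, 0), (1, 3)] := by decide
lemma enum0 : PySem.List.enumerate ([0] : List Int) 0 = [(0, 0)] := by decide

-- shape preservation through B's scatter loop
lemma length_scatter_fold (col : Int) (vals : List Int) (l : List (Int × Int)) (b : List (List Int)) :
    (l.foldl (scatterB col vals) b).length = b.length := by
  induction l generalizing b with
  | nil => rfl
  | cons p t ih => simp [List.foldl, scatterB, length_scell, ih]

lemma rowlen_scatter_fold (col : Int) (vals : List Int) (l : List (Int × Int)) (b : List (List Int))
    (hl : ∀ p ∈ l, 0 ≤ p.2) (i : Nat) :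
    ((l.foldl (scatterB col vals) b).getD i []).length = ((b.getD i []).length) := by
  induction l generalizing b with
  | nil => rfl
  | cons p t ih =>
    simp only [List.foldl]
    rw [ih _ (fun q hq => hl q (by simp [hq])), scatterB,
      rowlen_scell _ _ _ _ (hl p (by simp))]

lemma length_colB (b : List (List Int)) (rows : List Int) (col : Int) :
    (colB b rows col).length = b.length := length_scatter_fold _ _ _ _

lemma rowlen_colB (b : List (List Int)) (rows : List Int) (col : Int)
    (h : ∀ p ∈ PySem.List.enumerate rows 0, 0 ≤ p.2) (i : Nat) :
    ((colB b rows col).getD i []).length = (b.getD i []).length :=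
  rowlen_scatter_fold _ _ _ _ h i

-- composing the four per-column steps: a pointwise equality valid on a shape
-- invariant P preserved by the right-hand step lifts to the outer column fold
lemma fold4 (F G : List (List Int) → Int → List (List Int)) (P : List (List Int) → Prop)
    (hFG : ∀ b c, 0 ≤ c → c < 4 → P b → F b c = G b c)
    (hG : ∀ b c, P b → P (G b c)) (b0 : List (List Int)) (hP : P b0) :
    List.foldl F b0 [0, 1, 2, 3] = List.foldl G b0 [0, 1, 2, 3] := by
  simp only [List.foldl]
  rw [hFG _ _ (by norm_num) (by norm_num) hP,
    hFG _ _ (by norm_num) (by norm_num) (hG _ _ hP),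
    hFG _ _ (by norm_num) (by norm_num) (hG _ _ (hG _ _ hP)),
    hFG _ _ (by norm_num) (by norm_num) (hG _ _ (hG _ _ (hG _ _ hP)))]

-- per-column equivalence, one lemma per reachable visit order
lemma col_up (b : List (List Int)) (col : Int) (hc0 : 0 ≤ col) (hc4 : col < 4)
    (hL : 3 < b.length)
    (h0 : 4 ≤ (b.getD 0 []).length) (h1 : 4 ≤ (b.getD 1 []).length)
    (h2 : 4 ≤ (b.getD 2 []).length) (h3 : 4 ≤ (b.getD 3 []).length) :
    ((([0, 1, 2, 3] : List Int)).foldl (stepA 1 col) (b, -1)).1 = colB b [0, 1, 2, 3] col := by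
  have hb0 : idxOK 0 b := by show (0:Nat) < b.length; omega
  have hb1 : idxOK 1 b := by show (1:Nat) < b.length; omega
  have hb2 : idxOK 2 b := by show (2:Nat) < b.length; omega
  have hb3 : idxOK 3 b := by show (3:Nat) < b.length; omega
  have hw0 : cellOK col 0 b := by show col.toNat < (b.getD 0 []).length; omega
  have hw1 : cellOK col 1 b := by show col.toNat < (b.getD 1 []).length; omega
  have hw2 : cellOK col 2 b := by show col.toNat < (b.getD 2 []).length; omega
  have hw3 : cellOK col 3 b := by show col.toNat < (b.getD 3 []).length; omega
  unfold colB
  rw [enum4]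
  by_cases k0 : gcell b 0 col = 0 <;> by_cases k1 : gcell b 1 col = 0 <;>
    by_cases k2 : gcell b 2 col = 0 <;> by_cases k3 : gcell b 3 col = 0 <;>
    simp [stepA, gatherB, scatterB, List.filterMap, k0, k1, k2, k3,
      gcell_scell_ne, gcell_scell_same, scell_scell_same, scell_noop, scell_comm,
      idxOK_scell, cellOK_scell, length_scell, rowlen_scell, hb0, hb1, hb2, hb3, hw0, hw1, hw2, hw3, hc0,
      PySem.List.pyGetD_ofNat']

lemma col_down (b : List (List Int)) (col : Int) (hc0 : 0 ≤ col) (hc4 : col < 4)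
    (hL : 3 < b.length)
    (h0 : 4 ≤ (b.getD 0 []).length) (h1 : 4 ≤ (b.getD 1 []).length)
    (h2 : 4 ≤ (b.getD 2 []).length) (h3 : 4 ≤ (b.getD 3 []).length) :
    ((([3, 2, 1, 0] : List Int)).foldl (stepA (-1) col) (b, -1)).1 = colB b [3, 2, 1, 0] col := by
  have hb0 : idxOK 0 b := by show (0:Nat) < b.length; omega
  have hb1 : idxOK 1 b := by show (1:Nat) < b.length; omega
  have hb2 : idxOK 2 b := by show (2:Nat) < b.length; omega
  have hb3 : idxOK 3 b := by show (3:Nat) < b.length; omega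
  have hw0 : cellOK col 0 b := by show col.toNat < (b.getD 0 []).length; omega
  have hw1 : cellOK col 1 b := by show col.toNat < (b.getD 1 []).length; omega
  have hw2 : cellOK col 2 b := by show col.toNat < (b.getD 2 []).length; omega
  have hw3 : cellOK col 3 b := by show col.toNat < (b.getD 3 []).length; omega
  unfold colB
  rw [enum_down]
  by_cases k0 : gcell b 0 col = 0 <;> by_cases k1 : gcell b 1 col = 0 <;>
    by_cases k2 : gcell b 2 col = 0 <;> by_cases k3 : gcell b 3 col = 0 <;>
    simp [stepA, gatherB, scatterB, List.filterMap, k0, k1, k2, k3,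
      gcell_scell_ne, gcell_scell_same, scell_scell_same, scell_noop, scell_comm,
      idxOK_scell, cellOK_scell, length_scell, rowlen_scell, hb0, hb1, hb2, hb3, hw0, hw1, hw2, hw3, hc0,
      PySem.List.pyGetD_ofNat']

lemma col_two (b : List (List Int)) (col : Int) (hc0 : 0 ≤ col) (hc4 : col < 4)
    (hL0 : 0 < b.length) (hL2 : 2 < b.length)
    (h0 : 4 ≤ (b.getD 0 []).length) (h2 : 4 ≤ (b.getD 2 []).length) :
    ((([0, 2] : List Int)).foldl (stepA 2 col) (b, -1)).1 = colB b [0, 2] col := by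
  have hb0 : idxOK 0 b := by show (0:Nat) < b.length; omega
  have hb2 : idxOK 2 b := by show (2:Nat) < b.length; omega
  have hw0 : cellOK col 0 b := by show col.toNat < (b.getD 0 []).length; omega
  have hw2 : cellOK col 2 b := by show col.toNat < (b.getD 2 []).length; omega
  unfold colB
  rw [enum02]
  by_cases k0 : gcell b 0 col = 0 <;> by_cases k2 : gcell b 2 col = 0 <;>
    simp [stepA, gatherB, scatterB, List.filterMap, k0, k2,
      gcell_scell_ne, gcell_scell_same, scell_scell_same, scell_noop, scell_comm,
      idxOK_scell, cellOK_scell, length_scell, rowlen_scell, hb0, hb2, hw0, hw2, hc0,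
      PySem.List.pyGetD_ofNat']

lemma col_three (b : List (List Int)) (col : Int) (hc0 : 0 ≤ col) (hc4 : col < 4)
    (hL0 : 0 < b.length) (hL3 : 3 < b.length)
    (h0 : 4 ≤ (b.getD 0 []).length) (h3 : 4 ≤ (b.getD 3 []).length) :
    ((([0, 3] : List Int)).foldl (stepA 3 col) (b, -1)).1 = colB b [0, 3] col := by
  have hb0 : idxOK 0 b := by show (0:Nat) < b.length; omega
  have hb3 : idxOK 3 b := by show (3:Nat) < b.length; omega
  have hw0 : cellOK col 0 b := by show col.toNat < (b.getD 0 []).length; omega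
  have hw3 : cellOK col 3 b := by show col.toNat < (b.getD 3 []).length; omega
  unfold colB
  rw [enum03]
  by_cases k0 : gcell b 0 col = 0 <;> by_cases k3 : gcell b 3 col = 0 <;>
    simp [stepA, gatherB, scatterB, List.filterMap, k0, k3,
      gcell_scell_ne, gcell_scell_same, scell_scell_same, scell_noop, scell_comm,
      idxOK_scell, cellOK_scell, length_scell, rowlen_scell, hb0, hb3, hw0, hw3, hc0,
      PySem.List.pyGetD_ofNat']

lemma col_one (b : List (List Int)) (col d : Int) (hc0 : 0 ≤ col) (hc4 : col < 4)
    (hL0 : 0 < b.length) (h0 : 4 ≤ (b.getD 0 []).length) :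
    ((([0] : List Int)).foldl (stepA d col) (b, -1)).1 = colB b [0] col := by
  have hb0 : idxOK 0 b := by show (0:Nat) < b.length; omega
  have hw0 : cellOK col 0 b := by show col.toNat < (b.getD 0 []).length; omega
  unfold colB
  rw [enum0]
  by_cases k0 : gcell b 0 col = 0 <;>
    simp [stepA, gatherB, scatterB, List.filterMap, k0, scell_noop, hb0, hw0, hc0,
      PySem.List.pyGetD_ofNat']

-- ===== VERDICT (by name: the statement is the Claim_ definition above) =====
theorem shift_up_down_spec : Claim_equal_shift_up_down := by
  intro board direction hdom hpre
  obtain ⟨hd0, hshape⟩ := hpre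
  unfold Spec_shift_up_down shift_up_down shift_up_down_alt matrix_direction_indices
  by_cases hd1 : direction = 1
  · subst hd1
    have q0 := hshape 0 (by decide)
    have q1 := hshape 1 (by decide)
    have q2 := hshape 2 (by decide)
    have q3 := hshape 3 (by decide)
    norm_num
    rw [pyRange_cols]
    refine fold4 _ _ (fun b => 3 < b.length ∧ 4 ≤ (b.getD 0 []).length ∧
      4 ≤ (b.getD 1 []).length ∧ 4 ≤ (b.getD 2 []).length ∧ 4 ≤ (b.getD 3 []).length)
      ?_ ?_ board ?_
    · rintro b c hc0 hc4 ⟨hL, h0, h1, h2, h3⟩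
      exact col_up b c hc0 hc4 hL h0 h1 h2 h3
    · rintro b c ⟨hL, h0, h1, h2, h3⟩
      have he : ∀ p ∈ PySem.List.enumerate ([0, 1, 2, 3] : List Int) 0, 0 ≤ p.2 := by
        rw [enum4]; decide
      refine ⟨by rw [length_colB]; exact hL, ?_, ?_, ?_, ?_⟩ <;>
        rw [rowlen_colB _ _ _ he] <;> assumption
    · exact ⟨q3.2.1, q0.2.2, q1.2.2, q2.2.2, q3.2.2⟩
  · by_cases hdm1 : direction = -1
    · subst hdm1
      have q0 := hshape 0 (by decide)
      have q1 := hshape 1 (by decide)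
      have q2 := hshape 2 (by decide)
      have q3 := hshape 3 (by decide)
      norm_num
      rw [pyRange_cols, pyRange_down]
      refine fold4 _ _ (fun b => 3 < b.length ∧ 4 ≤ (b.getD 0 []).length ∧
        4 ≤ (b.getD 1 []).length ∧ 4 ≤ (b.getD 2 []).length ∧ 4 ≤ (b.getD 3 []).length)
        ?_ ?_ board ?_
      · rintro b c hc0 hc4 ⟨hL, h0, h1, h2, h3⟩
        exact col_down b c hc0 hc4 hL h0 h1 h2 h3
      · rintro b c ⟨hL, h0, h1, h2, h3⟩
        have he : ∀ p ∈ PySem.List.enumerate ([3, 2, 1, 0] : List Int) 0, 0 ≤ p.2 := by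
          rw [enum_down]; decide
        refine ⟨by rw [length_colB]; exact hL, ?_, ?_, ?_, ?_⟩ <;>
          rw [rowlen_colB _ _ _ he] <;> assumption
      · exact ⟨q3.2.1, q0.2.2, q1.2.2, q2.2.2, q3.2.2⟩
    · by_cases hd2 : direction = 2
      · subst hd2
        have q0 := hshape 0 (by decide)
        have q2 := hshape 2 (by decide)
        norm_num
        rw [pyRange_cols, pyRange_two]
        refine fold4 _ _ (fun b => 2 < b.length ∧ 4 ≤ (b.getD 0 []).length ∧
          4 ≤ (b.getD 2 []).length) ?_ ?_ board ?_
        · rintro b c hc0 hc4 ⟨hL, h0, h2⟩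
          exact col_two b c hc0 hc4 (by omega) (by omega) h0 h2
        · rintro b c ⟨hL, h0, h2⟩
          have he : ∀ p ∈ PySem.List.enumerate ([0, 2] : List Int) 0, 0 ≤ p.2 := by
            rw [enum02]; decide
          refine ⟨by rw [length_colB]; exact hL, ?_, ?_⟩ <;>
            rw [rowlen_colB _ _ _ he] <;> assumption
        · exact ⟨q2.2.1, q0.2.2, q2.2.2⟩
      · by_cases hd3 : direction = 3
        · subst hd3
          have q0 := hshape 0 (by decide)
          have q3 := hshape 3 (by decide)
          norm_num
          rw [pyRange_cols, pyRange_three]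
          refine fold4 _ _ (fun b => 3 < b.length ∧ 4 ≤ (b.getD 0 []).length ∧
            4 ≤ (b.getD 3 []).length) ?_ ?_ board ?_
          · rintro b c hc0 hc4 ⟨hL, h0, h3⟩
            exact col_three b c hc0 hc4 (by omega) (by omega) h0 h3
          · rintro b c ⟨hL, h0, h3⟩
            have he : ∀ p ∈ PySem.List.enumerate ([0, 3] : List Int) 0, 0 ≤ p.2 := by
              rw [enum03]; decide
            refine ⟨by rw [length_colB]; exact hL, ?_, ?_⟩ <;>
              rw [rowlen_colB _ _ _ he] <;> assumption
          · exact ⟨q3.2.1, q0.2.2, q3.2.2⟩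
        · by_cases hd4 : 4 ≤ direction
          · have hif : ¬ (-1 * direction = 1) := by omega
            rw [if_neg hif, pyRange_big direction hd4] at hshape
            simp only [if_neg hif, pyRange_big direction hd4]
            have q0 := hshape 0 (by simp)
            rw [pyRange_cols]
            refine fold4 _ _ (fun b => 0 < b.length ∧ 4 ≤ (b.getD 0 []).length)
              ?_ ?_ board ?_
            · rintro b c hc0 hc4 ⟨hL, h0⟩
              exact col_one b c direction hc0 hc4 hL h0
            · rintro b c ⟨hL, h0⟩
              have he : ∀ p ∈ PySem.List.enumerate ([0] : List Int) 0, 0 ≤ p.2 := by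
                rw [enum0]; decide
              exact ⟨by rw [length_colB]; exact hL, by rw [rowlen_colB _ _ _ he]; exact h0⟩
            · exact ⟨q0.2.1, q0.2.2⟩
          · have hneg : direction < 0 := by omega
            have hif : ¬ (-1 * direction = 1) := by omega
            simp only [if_neg hif, pyRange_negstep direction hneg]
            rw [pyRange_cols]
            simp [List.foldl, colB]
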